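-- pv_equiv track=rewrite | github.com/DaMaHub/opendocumentrepository | odr.py | str2keys
-- ===== SOURCE A (Python) =====
-- import copy
--
-- def str2keys(keystring):
--     """Help function: splits the keystring into key words, using , ; and whitespaces as splits"""
--     alist = keystring.split(";")
--     blist = []
--     for k in alist:
--         for i in k.split(","):
--             for j in i.split():
--                 blist.append(j.lower())
--     return copy.deepcopy(blist)
-- ===== SOURCE B (Python) =====
-- def str2keys(keystring):
--     """Help function: splits the keystring into key words, using , ; and whitespaces as splits"""
--     res = []
--     buf = ""
--     for ch in keystring:
--         if ch == ';' or ch == ',' or ch.isspace():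
--             if buf:
--                 res.append(buf.lower())
--                 buf = ""
--         else:
--             buf += ch
--     if buf:
--         res.append(buf.lower())
--     return res
-- ===== Notes on version B (the rewrite author's own statement) =====
-- stated objective: alternative
-- what changed: Replaced the three nested split passes (split on semicolon, then on comma, then on whitespace) plus an append loop by a single left-to-right character scan with a token buffer that is flushed lowercased at each delimiter.
import Mathlib
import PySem

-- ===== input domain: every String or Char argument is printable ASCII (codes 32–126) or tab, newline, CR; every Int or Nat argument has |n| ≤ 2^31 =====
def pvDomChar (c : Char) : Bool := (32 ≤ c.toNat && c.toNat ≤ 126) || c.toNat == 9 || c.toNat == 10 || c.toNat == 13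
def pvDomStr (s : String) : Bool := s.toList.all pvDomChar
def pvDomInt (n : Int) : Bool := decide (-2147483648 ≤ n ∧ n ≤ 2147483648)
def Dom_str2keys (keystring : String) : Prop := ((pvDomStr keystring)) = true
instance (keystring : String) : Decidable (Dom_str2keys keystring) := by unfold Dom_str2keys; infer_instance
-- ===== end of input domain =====

-- B replaces A's three nested split passes by one left-to-right character scan with a
-- token buffer (objective: alternative decomposition, same O(n) cost).

-- ===== PORT A =====
-- keystring.split(";") → Chars.splitOn · [';'] (sep nonempty, so Python never raises);
-- k.split(",") likewise; i.split() → Str.split₀; copy.deepcopy of a list of strings is the identity on the value.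
def str2keys (keystring : String) : List String :=
  let alist := (PySem.Chars.splitOn keystring.toList [';']).map String.ofList
  let blist : List String := []
  alist.foldl (fun blist k =>
    ((PySem.Chars.splitOn k.toList [',']).map String.ofList).foldl (fun blist i =>
      (PySem.Str.split₀ i).foldl (fun blist j => blist ++ [PySem.Str.lower j]) blist) blist) blist

-- ===== PORT B =====
-- single scan: state = (result list, current-token buffer); flush lowercased buffer at each delimiter
def str2keys_alt (keystring : String) : List String :=
  let r := keystring.toList.foldl
    (fun (st : List String × List Char) c =>
      if c == ';' || c == ',' || PySem.Chars.isspace c then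
        if st.2 = [] then st
        else (st.1 ++ [String.ofList (PySem.Chars.lower st.2)], [])
      else (st.1, st.2 ++ [c]))
    ([], [])
  if r.2 = [] then r.1 else r.1 ++ [String.ofList (PySem.Chars.lower r.2)]

-- ===== PRECONDITION & SPEC =====
def Spec_str2keys (keystring : String) (out : List String) : Prop := out = str2keys_alt keystring
instance (keystring : String) (out : List String) : Decidable (Spec_str2keys keystring out) := by unfold Spec_str2keys; infer_instance

-- ===== CLAIM (what is proved, stated in full; the proofs are below) =====
def Claim_equal_str2keys : Prop := ∀ (keystring : String), Dom_str2keys keystring → Spec_str2keys keystring (str2keys keystring)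

-- ===== LEMMAS AND PROOFS =====

-- the combined delimiter predicate of B's scan
def pvDelim (c : Char) : Bool := c == ';' || c == ',' || PySem.Chars.isspace c

-- reference tokenizer: maximal p-free runs of l, with `cur` the pending (in-order) buffer
def pvTok (p : Char → Bool) : List Char → List Char → List (List Char)
  | [], cur => if cur = [] then [] else [cur]
  | c :: rest, cur =>
    if p c then (if cur = [] then pvTok p rest [] else cur :: pvTok p rest [])
    else pvTok p rest (cur ++ [c])

-- reference single-character splitter: s.split(sep) for a one-character sep
def pvSp (s : Char) : List Char → List (List Char)
  | [] => [[]]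
  | c :: rest => if c = s then [] :: pvSp s rest else (pvSp s rest).modifyHead (c :: ·)

theorem pvSp_ne_nil (s : Char) (l : List Char) : pvSp s l ≠ [] := by
  cases l with
  | nil => simp [pvSp]
  | cons c rest =>
    by_cases h : c = s
    · simp [pvSp, h]
    · rcases hr : pvSp s rest with _ | ⟨h1, t1⟩
      · exact absurd hr (pvSp_ne_nil s rest)
      · simp [pvSp, h, hr, List.modifyHead]

theorem split0_go (l cur acc) :
    PySem.Chars.split₀.go l cur acc
      = acc.reverse ++ pvTok PySem.Chars.isspace l cur.reverse := by
  induction l generalizing cur acc with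
  | nil =>
    simp [PySem.Chars.split₀.go, pvTok, List.isEmpty_iff]
    rcases cur with _ | ⟨c, cs⟩ <;> simp
  | cons c rest ih =>
    rw [PySem.Chars.split₀.go]
    by_cases h : PySem.Chars.isspace c = true
    · simp only [h, if_pos]
      rcases hc : cur with _ | ⟨d, ds⟩ <;>
        simp [pvTok, h, ih]
    · simp only [h]
      simp [pvTok, h, ih]

theorem split0_eq (cs : List Char) :
    PySem.Chars.split₀ cs = pvTok PySem.Chars.isspace cs [] := by
  rw [PySem.Chars.split₀, split0_go]; simp

theorem splitOn_go (s : Char) (l : List Char) :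
    ∀ (fuel : Nat) (cur : List Char) (acc : List (List Char)), l.length < fuel →
    PySem.Chars.splitOn.go [s] fuel l cur acc
      = acc.reverse ++ (pvSp s l).modifyHead (cur.reverse ++ ·) := by
  induction l with
  | nil =>
    intro fuel cur acc hf
    match fuel with
    | fuel + 1 => simp [PySem.Chars.splitOn.go, pvSp]
  | cons c rest ih =>
    intro fuel cur acc hf
    match fuel with
    | fuel + 1 =>
      rw [PySem.Chars.splitOn.go]
      by_cases h : c = s
      · have hpre : List.isPrefixOf [s] (c :: rest) = true := by
          simp [List.isPrefixOf, h]
        simp only [hpre, if_pos, List.length_cons, List.length_nil, Nat.zero_add,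
          List.drop_succ_cons, List.drop_zero]
        rw [ih fuel [] (cur.reverse :: acc) (by simpa using Nat.lt_of_succ_lt_succ hf)]
        rcases hr : pvSp s rest with _ | ⟨h1, t1⟩
        · exact absurd hr (pvSp_ne_nil s rest)
        · simp [pvSp, h, hr, List.modifyHead]
      · have hpre : List.isPrefixOf [s] (c :: rest) = false := by
          simp [List.isPrefixOf]; exact fun hh => absurd hh.symm h
        simp only [hpre, Bool.false_eq_true, if_false]
        rw [ih fuel (c :: cur) acc (by simpa using Nat.lt_of_succ_lt_succ hf)]
        rcases hr : pvSp s rest with _ | ⟨h1, t1⟩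
        · exact absurd hr (pvSp_ne_nil s rest)
        · simp [pvSp, h, hr, List.modifyHead]

theorem splitOn_one (s : Char) (cs : List Char) :
    PySem.Chars.splitOn cs [s] = pvSp s cs := by
  rw [PySem.Chars.splitOn, splitOn_go s cs (cs.length + 1) [] [] (by omega)]
  rcases hr : pvSp s cs with _ | ⟨h1, t1⟩
  · exact absurd hr (pvSp_ne_nil s cs)
  · simp [List.modifyHead]

theorem pvSp_subset (s : Char) (l : List Char) :
    ∀ i ∈ pvSp s l, ∀ c ∈ i, c ∈ l := by
  induction l with
  | nil =>
    intro i hi c hc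
    simp [pvSp] at hi
    simp [hi] at hc
  | cons c0 rest ih =>
    intro i hi c hc
    by_cases h : c0 = s
    · subst h
      simp only [pvSp] at hi
      rcases List.mem_cons.mp hi with rfl | hi
      · cases hc
      · exact List.mem_cons_of_mem _ (ih i hi c hc)
    · rcases hr : pvSp s rest with _ | ⟨h1, t1⟩
      · exact absurd hr (pvSp_ne_nil s rest)
      · simp only [pvSp, if_neg h, hr, List.modifyHead] at hi
        rcases List.mem_cons.mp hi with rfl | hi
        · rcases List.mem_cons.mp hc with rfl | hc
          · exact List.mem_cons_self
          · exact List.mem_cons_of_mem _ (ih h1 (by simp [hr]) c hc)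
        · exact List.mem_cons_of_mem _ (ih i (by simp [hr, hi]) c hc)

theorem pvSp_not_mem (s : Char) (l : List Char) :
    ∀ i ∈ pvSp s l, s ∉ i := by
  induction l with
  | nil =>
    intro i hi
    simp [pvSp] at hi
    simp [hi]
  | cons c0 rest ih =>
    intro i hi
    by_cases h : c0 = s
    · subst h
      simp only [pvSp] at hi
      rcases List.mem_cons.mp hi with rfl | hi
      · simp
      · exact ih i hi
    · rcases hr : pvSp s rest with _ | ⟨h1, t1⟩
      · exact absurd hr (pvSp_ne_nil s rest)
      · simp only [pvSp, if_neg h, hr, List.modifyHead] at hi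
        rcases List.mem_cons.mp hi with rfl | hi
        · intro hmem
          rcases List.mem_cons.mp hmem with rfl | hmem
          · exact h rfl
          · exact ih h1 (by simp [hr]) hmem
        · exact ih i (by simp [hr, hi])

theorem pvTok_congr (p q : Char → Bool) (l : List Char)
    (h : ∀ c ∈ l, p c = q c) : ∀ cur, pvTok p l cur = pvTok q l cur := by
  induction l with
  | nil => intro cur; rfl
  | cons c rest ih =>
    intro cur
    have hc : p c = q c := h c (List.mem_cons_self)
    have hrest : ∀ c ∈ rest, p c = q c := fun c hcm => h c (List.mem_cons_of_mem _ hcm)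
    simp only [pvTok, hc, ih hrest]

theorem pvTok_sp (q : Char → Bool) (s : Char) (hq : q s = true) (l : List Char) :
    ∀ (cur : List Char), pvTok q l cur
      = pvTok q ((pvSp s l).headI) cur
          ++ ((pvSp s l).tail).flatMap (fun k => pvTok q k []) := by
  induction l with
  | nil => intro cur; simp [pvSp]
  | cons c rest ih =>
    intro cur
    rcases hr : pvSp s rest with _ | ⟨h1, t1⟩
    · exact absurd hr (pvSp_ne_nil s rest)
    · have hrest := ih []
      rw [hr] at hrest
      simp only [List.headI, List.tail_cons] at hrest
      by_cases hc : c = s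
      · subst hc
        simp only [pvSp, hr, List.headI]
        by_cases hcur : cur = [] <;> simp [pvTok, hq, hcur, hrest]
      · simp only [pvSp, if_neg hc, hr, List.modifyHead, List.headI, List.tail_cons]
        by_cases hqc : q c = true
        · by_cases hcur : cur = [] <;> simp [pvTok, hqc, hcur, hrest]
        · simp only [pvTok, hqc, Bool.false_eq_true, if_false]
          have h2 := ih (cur ++ [c])
          rw [hr] at h2
          simpa using h2

theorem pvTok_flat (q : Char → Bool) (s : Char) (hq : q s = true) (l : List Char) :
    (pvSp s l).flatMap (fun k => pvTok q k []) = pvTok q l [] := by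
  rcases hr : pvSp s l with _ | ⟨h1, t1⟩
  · exact absurd hr (pvSp_ne_nil s l)
  · rw [pvTok_sp q s hq l [], hr]
    simp

-- A's nested splits compute the pvDelim-tokens, lowercased
theorem a_eq (keystring : String) :
    str2keys keystring
      = (pvTok pvDelim keystring.toList []).map
          (fun t => String.ofList (PySem.Chars.lower t)) := by
  unfold str2keys
  simp only [splitOn_one, PySem.Str.split₀, PySem.Str.lower,
    PySem.List.foldl_append_singleton_eq_map, PySem.List.foldl_append_eq_flatMap,
    List.foldl_map, String.toList_ofList, List.nil_append, split0_eq]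
  have hcongr : ∀ k ∈ pvSp ';' keystring.toList, ∀ i ∈ pvSp ',' k,
      pvTok PySem.Chars.isspace i [] = pvTok pvDelim i [] := by
    intro k hk i hi
    refine pvTok_congr _ _ i (fun c hc => ?_) []
    have hns : c ≠ ';' := fun hcs => pvSp_not_mem ';' keystring.toList k hk
      (hcs ▸ pvSp_subset ',' k i hi c hc)
    have hnc : c ≠ ',' := fun hcc => pvSp_not_mem ',' k i hi (hcc ▸ hc)
    simp [pvDelim, hns, hnc]
  calc (pvSp ';' keystring.toList).flatMap
        (fun k => (pvSp ',' k).flatMap fun i =>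
          (pvTok PySem.Chars.isspace i []).map fun t => String.ofList (PySem.Chars.lower t))
      = (pvSp ';' keystring.toList).flatMap
        (fun k => ((pvSp ',' k).flatMap fun i => pvTok pvDelim i []).map
          fun t => String.ofList (PySem.Chars.lower t)) := by
        refine List.flatMap_congr (fun k hk => ?_)
        rw [List.map_flatMap]
        exact List.flatMap_congr (fun i hi => by rw [hcongr k hk i hi])
    _ = (pvSp ';' keystring.toList).flatMap
        (fun k => (pvTok pvDelim k []).map fun t => String.ofList (PySem.Chars.lower t)) := by
        refine List.flatMap_congr (fun k hk => ?_)
        rw [pvTok_flat pvDelim ',' (by simp [pvDelim]) k]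
    _ = (pvTok pvDelim keystring.toList []).map
          (fun t => String.ofList (PySem.Chars.lower t)) := by
        rw [← List.map_flatMap, pvTok_flat pvDelim ';' (by simp [pvDelim])]

-- B's scan computes the same tokens: the fold's invariant
theorem b_fold (l : List Char) :
    ∀ (res : List String) (buf : List Char),
    (if (l.foldl
        (fun (st : List String × List Char) c =>
          if c == ';' || c == ',' || PySem.Chars.isspace c then
            if st.2 = [] then st
            else (st.1 ++ [String.ofList (PySem.Chars.lower st.2)], [])
          else (st.1, st.2 ++ [c])) (res, buf)).2 = []
      then (l.foldl
        (fun (st : List String × List Char) c =>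
          if c == ';' || c == ',' || PySem.Chars.isspace c then
            if st.2 = [] then st
            else (st.1 ++ [String.ofList (PySem.Chars.lower st.2)], [])
          else (st.1, st.2 ++ [c])) (res, buf)).1
      else (l.foldl
        (fun (st : List String × List Char) c =>
          if c == ';' || c == ',' || PySem.Chars.isspace c then
            if st.2 = [] then st
            else (st.1 ++ [String.ofList (PySem.Chars.lower st.2)], [])
          else (st.1, st.2 ++ [c])) (res, buf)).1
        ++ [String.ofList (PySem.Chars.lower (l.foldl
        (fun (st : List String × List Char) c =>
          if c == ';' || c == ',' || PySem.Chars.isspace c then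
            if st.2 = [] then st
            else (st.1 ++ [String.ofList (PySem.Chars.lower st.2)], [])
          else (st.1, st.2 ++ [c])) (res, buf)).2)])
      = res ++ (pvTok pvDelim l buf).map (fun t => String.ofList (PySem.Chars.lower t)) := by
  induction l with
  | nil =>
    intro res buf
    by_cases hbuf : buf = [] <;> simp [pvTok, hbuf]
  | cons c rest ih =>
    intro res buf
    rw [List.foldl_cons]
    rcases hd : pvDelim c with _ | _
    · have hstep : (if c == ';' || c == ',' || PySem.Chars.isspace c then
            if (res, buf).2 = [] then (res, buf)
            else ((res, buf).1 ++ [String.ofList (PySem.Chars.lower (res, buf).2)], [])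
          else ((res, buf).1, (res, buf).2 ++ [c])) = (res, buf ++ [c]) := by
        have hd' : (c == ';' || c == ',' || PySem.Chars.isspace c) = false := hd
        simp [hd']
      rw [hstep, ih res (buf ++ [c])]
      simp [pvTok, hd]
    · have hd' : (c == ';' || c == ',' || PySem.Chars.isspace c) = true := hd
      by_cases hbuf : buf = []
      · have hstep : (if c == ';' || c == ',' || PySem.Chars.isspace c then
            if (res, buf).2 = [] then (res, buf)
            else ((res, buf).1 ++ [String.ofList (PySem.Chars.lower (res, buf).2)], [])
          else ((res, buf).1, (res, buf).2 ++ [c])) = (res, []) := by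
          simp [hd', hbuf]
        rw [hstep, ih res []]
        simp [pvTok, hd, hbuf]
      · have hstep : (if c == ';' || c == ',' || PySem.Chars.isspace c then
            if (res, buf).2 = [] then (res, buf)
            else ((res, buf).1 ++ [String.ofList (PySem.Chars.lower (res, buf).2)], [])
          else ((res, buf).1, (res, buf).2 ++ [c])) = (res ++ [String.ofList (PySem.Chars.lower buf)], []) := by
          simp [hd', hbuf]
        rw [hstep, ih (res ++ [String.ofList (PySem.Chars.lower buf)]) []]
        simp [pvTok, hd, hbuf]

theorem b_eq (keystring : String) :
    str2keys_alt keystring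
      = (pvTok pvDelim keystring.toList []).map
          (fun t => String.ofList (PySem.Chars.lower t)) := by
  unfold str2keys_alt
  simp only []
  rw [b_fold keystring.toList [] []]
  simp

-- ===== VERDICT (by name: the statement is the Claim_ definition above) =====
theorem str2keys_spec : Claim_equal_str2keys := by
  intro keystring _
  unfold Spec_str2keys
  rw [a_eq, b_eq]
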